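-- pv_equiv track=rewrite | github.com/ITmonster001/test001 | review.py | get_repetition
-- ===== SOURCE A (Python) =====
-- def get_repetition(nums):
--     a = [] # 定义一个变量，存放重复的值，并进行最终输出
--     b = {} # 定义一个字典，存放重复的值和对应的出现次数
--     for i in range(len(nums)): # 遍历列表，将重复的值和重复的次数提出来，放到一个字典里面
--         if nums[i] in nums[i+1:]:
--             b[nums[i]] = nums.count(nums[i])
--
--     b = sorted(b.items(),key=lambda items:items[1],reverse=True) # 对字典 根据value值进行降序排列，返回列表
--     for j in range(len(b)): # 将最新列表中的每个值里面的第一个值取出来，放到一个新的列表中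
--         a.append(b[j][0])
--     return a
-- ===== SOURCE B (Python) =====
-- def get_repetition(nums):
--     # one pass to count, then bucket the duplicated values by their count
--     # (first-occurrence order inside each bucket), emit buckets high-to-low
--     freq = {}
--     for x in nums:
--         freq[x] = freq.get(x, 0) + 1
--     buckets = {}
--     for x in dict.fromkeys(nums):  # distinct values, first-occurrence order
--         c = freq[x]
--         if c > 1:
--             buckets[c] = buckets.get(c, []) + [x]
--     res = []
--     for c in range(len(nums), 1, -1):
--         res += buckets.get(c, [])
--     return res
-- ===== Notes on version B (the rewrite author's own statement) =====
-- stated objective: faster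
-- what changed: A scans ahead (nums[i+1:]) and calls nums.count for every index and then comparison-sorts the dict items by value; B counts everything in one dict pass, groups the duplicated values into buckets keyed by their count in first-occurrence order, and emits the buckets from the highest count down to 2 (a counting/bucket sort, no comparison sort).
import Mathlib
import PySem

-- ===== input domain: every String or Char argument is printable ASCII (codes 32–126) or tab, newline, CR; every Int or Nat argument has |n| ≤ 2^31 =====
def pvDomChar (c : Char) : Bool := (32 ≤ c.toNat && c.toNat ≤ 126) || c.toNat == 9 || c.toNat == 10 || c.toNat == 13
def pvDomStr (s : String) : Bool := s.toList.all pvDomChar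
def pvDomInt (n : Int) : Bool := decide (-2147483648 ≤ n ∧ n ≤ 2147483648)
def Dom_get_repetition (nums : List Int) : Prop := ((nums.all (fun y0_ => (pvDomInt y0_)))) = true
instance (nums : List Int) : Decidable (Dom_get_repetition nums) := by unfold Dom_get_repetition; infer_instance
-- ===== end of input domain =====

-- B replaces A's scan-ahead/count/comparison-sort with one counting pass plus buckets
-- keyed by frequency, emitted from high count to low (objective: faster).

-- ===== PORT A =====
-- indices i drawn from range(len(nums)) are always in range, so nums[i] is ported
-- with pyGetD and a dummy default
def get_repetition (nums : List Int) : List Int :=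
  let b := (PySem.List.pyRange 0 (nums.length : Int)).foldl
    (fun (d : PySem.Dict Int Int) i =>
      if (PySem.List.slice nums (some (i + 1)) none).contains (PySem.List.pyGetD nums i 0) then
        d.insert (PySem.List.pyGetD nums i 0) ((PySem.List.count nums (PySem.List.pyGetD nums i 0) : Int))
      else d)
    PySem.Dict.empty
  let bs := PySem.List.sorted b.items (fun p => p.2) true
  (PySem.List.pyRange 0 (bs.length : Int)).foldl
    (fun a j => a ++ [(PySem.List.pyGetD bs j (0, 0)).1]) []

-- ===== PORT B =====
-- freq[x] in the second loop always hits a key (x ∈ nums), so it is ported with getD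
def get_repetition_alt (nums : List Int) : List Int :=
  let freq := nums.foldl (fun (d : PySem.Dict Int Int) x => d.insert x (d.getD x 0 + 1))
    PySem.Dict.empty
  let buckets := (PySem.List.dedup nums).foldl
    (fun (d : PySem.Dict Int (List Int)) x =>
      let c := freq.getD x 0
      if 1 < c then d.insert c (d.getD c [] ++ [x]) else d)
    PySem.Dict.empty
  (PySem.List.pyRange (nums.length : Int) 1 (-1)).foldl
    (fun res c => res ++ buckets.getD c []) []

-- ===== PRECONDITION & SPEC =====
def Spec_get_repetition (nums : List Int) (out : List Int) : Prop := out = get_repetition_alt nums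
instance (nums : List Int) (out : List Int) : Decidable (Spec_get_repetition nums out) := by unfold Spec_get_repetition; infer_instance

-- ===== CLAIM (what is proved, stated in full; the proofs are below) =====
def Claim_equal_get_repetition : Prop := ∀ (nums : List Int), Dom_get_repetition nums → Spec_get_repetition nums (get_repetition nums)

-- ===== LEMMAS AND PROOFS =====

-- count of v in n, as a Python int
def pvCnt (n : List Int) (v : Int) : Int := (List.count v n : Int)

-- the duplicated values of n in first-occurrence order
def pvDup (n : List Int) : List Int :=
  (PySem.Set.ofList n).filter (fun v => decide (1 < pvCnt n v))

def pvPairs (n : List Int) : List (Int × Int) := (pvDup n).map (fun v => (v, pvCnt n v))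

-- the counts len(n), len(n)-1, …, 2 in descending order (= range(len(n), 1, -1))
def pvCs (n : List Int) : List Int :=
  (List.range (n.length - 1)).map (fun (j : Nat) => (n.length : Int) - (j : Int))

-- the common normal form of both programs
def pvBucketed (n : List Int) : List Int :=
  (pvCs n).flatMap (fun c => (pvDup n).filter (fun v => decide (pvCnt n v = c)))

lemma map_id_congr {α : Type} (l : List α) (f : α → α) (h : ∀ a ∈ l, f a = a) :
    l.map f = l := by
  induction l with
  | nil => rfl
  | cons a t ih =>
      simp only [List.map_cons]
      rw [h a (by simp), ih (fun b hb => h b (by simp [hb]))]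

lemma insertBy_all_before {α : Type} (before : α → α → Bool) (x : α) (l : List α)
    (h : ∀ y ∈ l, before x y = true) :
    PySem.List.insertBy before x l = x :: l := by
  cases l with
  | nil => simp [PySem.List.insertBy]
  | cons y t => simp [PySem.List.insertBy, h y (by simp)]

lemma insertBy_append_not {α : Type} (before : α → α → Bool) (x : α) (l1 l2 : List α)
    (h : ∀ y ∈ l1, before x y = false) :
    PySem.List.insertBy before x (l1 ++ l2) = l1 ++ PySem.List.insertBy before x l2 := by
  induction l1 with
  | nil => simp
  | cons y t ih =>
      simp only [List.cons_append, PySem.List.insertBy, h y (by simp)]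
      simp only [Bool.false_eq_true, if_false]
      rw [ih (fun z hz => h z (by simp [hz]))]

-- inserting an element into a bucket concatenation puts it at the end of its bucket
lemma insertBy_desc_flatMap {α : Type} (cs : List Int) (g : Int → List (α × Int))
    (p : α × Int) (hcs : cs.Pairwise (fun a b => b < a)) (hp : p.2 ∈ cs)
    (hg : ∀ c, ∀ q ∈ g c, q.2 = c) :
    PySem.List.insertBy (fun a b => decide (b.2 < a.2)) p (cs.flatMap g)
      = cs.flatMap (fun c => g c ++ if p.2 = c then [p] else []) := by
  induction cs with
  | nil => cases hp
  | cons c cs' ih =>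
      rcases List.pairwise_cons.mp hcs with ⟨hgt, hcs'⟩
      simp only [List.flatMap_cons]
      by_cases hpc : p.2 = c
      · have h1 : ∀ y ∈ g c, (decide (y.2 < p.2)) = false := by
          intro y hy; simp [hg c y hy, hpc]
        rw [insertBy_append_not _ _ _ _ h1]
        have h2 : ∀ y ∈ cs'.flatMap g, (decide (y.2 < p.2)) = true := by
          intro y hy
          rcases List.mem_flatMap.mp hy with ⟨c', hc', hyc⟩
          simp [hg c' y hyc, hpc]
          exact hgt c' hc'
        rw [insertBy_all_before _ _ _ h2]
        have h3 : cs'.flatMap (fun c => g c ++ if p.2 = c then [p] else []) = cs'.flatMap g := by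
          apply List.flatMap_congr
          intro c' hc'
          have : p.2 ≠ c' := by have := hgt c' hc'; omega
          simp [this]
        rw [h3, if_pos hpc]
        simp
      · have hp' : p.2 ∈ cs' := by
          rcases List.mem_cons.mp hp with h | h
          · exact absurd h hpc
          · exact h
        have h1 : ∀ y ∈ g c, (decide (y.2 < p.2)) = false := by
          intro y hy
          have hc : y.2 = c := hg c y hy
          have : p.2 < c := by have := hgt _ hp'; omega
          simp [hc]; omega
        rw [insertBy_append_not _ _ _ _ h1, ih hcs' hp']
        rw [if_neg hpc]
        simp

-- a stable descending sort by the second component is the bucket concatenation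
lemma sorted_rev_snd_eq_flatMap {α : Type} (L : List (α × Int)) (cs : List Int)
    (hcs : cs.Pairwise (fun a b => b < a)) (hL : ∀ p ∈ L, p.2 ∈ cs) :
    PySem.List.sorted L (fun p => p.2) true
      = cs.flatMap (fun c => L.filter (fun p => decide (p.2 = c))) := by
  rw [PySem.List.sorted_rev_eq_foldl_insertBy]
  induction L using List.reverseRecOn with
  | nil => simp
  | append_singleton l p ih =>
      rw [List.foldl_append, List.foldl_cons, List.foldl_nil]
      rw [ih (fun q hq => hL q (by simp [hq]))]
      rw [insertBy_desc_flatMap cs _ p hcs (hL p (by simp))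
        (fun c q hq => by simpa using (List.mem_filter.mp hq).2)]
      apply List.flatMap_congr
      intro c hc
      rw [List.filter_append]
      simp only [List.filter_cons, List.filter_nil]
      by_cases h : p.2 = c <;> simp [h]

-- range(k, 1, -1) spelled out
lemma pyRange_desc (k : Int) :
    PySem.List.pyRange k 1 (-1) = (List.range (k - 1).toNat).map (fun (j : Nat) => k - (j : Int)) := by
  by_cases h : 1 < k
  · simp only [PySem.List.pyRange]
    norm_num [h]
    intro a _
    ring
  · have h0 : (k - 1).toNat = 0 := by omega
    simp only [PySem.List.pyRange]
    norm_num [h, h0]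

lemma pvCs_pairwise (n : List Int) : (pvCs n).Pairwise (fun a b => b < a) := by
  unfold pvCs
  rw [List.pairwise_map]
  have := List.pairwise_lt_range (n := n.length - 1)
  exact this.imp (by intro a b h; omega)

lemma mem_pvCs (n : List Int) (c : Int) (h2 : 2 ≤ c) (hl : c ≤ (n.length : Int)) :
    c ∈ pvCs n := by
  unfold pvCs
  refine List.mem_map.mpr ⟨((n.length : Int) - c).toNat, List.mem_range.mpr ?_, ?_⟩
  · omega
  · omega

-- A's dict after the first loop: the duplicated values seen so far, in
-- first-occurrence order, each mapped to its count
lemma dictA_items (n : List Int) (k : Nat) (hk : k ≤ n.length) :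
    (PySem.List.pyRange 0 (k : Int)).foldl
      (fun (d : PySem.Dict Int Int) i =>
        if (PySem.List.slice n (some (i + 1)) none).contains (PySem.List.pyGetD n i 0) then
          d.insert (PySem.List.pyGetD n i 0) ((PySem.List.count n (PySem.List.pyGetD n i 0) : Int))
        else d)
      PySem.Dict.empty
    = PySem.Dict.mk (((PySem.Set.ofList (n.take k)).filter
        (fun v => decide (1 < pvCnt n v))).map (fun v => (v, pvCnt n v))) := by
  have hit : ∀ (l : List (Int × Int)), (PySem.Dict.mk l).items = l := fun _ => rfl
  induction k with
  | zero => rfl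
  | succ k ih =>
      have hkl : k < n.length := hk
      have h0k : (0:Int) ≤ (k:Int) := by positivity
      have hcast : ((k+1 : Nat) : Int) = (k : Int) + 1 := by omega
      rw [hcast, PySem.List.pyRange_one_succ_right h0k, List.foldl_append, ih (le_of_lt hkl),
        List.foldl_cons, List.foldl_nil]
      have hx : PySem.List.pyGetD n (k : Int) 0 = n[k] := by
        rw [PySem.List.pyGetD_eq_getElem n 0 h0k (by exact_mod_cast hkl)]
        simp
      have hsl : PySem.List.slice n (some ((k:Int) + 1)) none = n.drop (k+1) := by
        have ht : (((k : Int) + 1)).toNat = k + 1 := by omega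
        rw [PySem.List.slice_from n (by omega), ht]
      have htake : n.take (k+1) = n.take k ++ [n[k]] := by
        rw [List.take_succ]; simp [List.getElem?_eq_getElem hkl]
      have hsum : List.count n[k] n
          = List.count n[k] (n.take k) + 1 + List.count n[k] (n.drop (k+1)) := by
        set x := n[k] with hxdef
        have hsplit : n.drop k = x :: n.drop (k+1) := List.drop_eq_getElem_cons hkl
        have h1 : List.count x n = List.count x (n.take k ++ n.drop k) := by
          rw [List.take_append_drop]
        rw [h1, hsplit, List.count_append, List.count_cons]
        simp
        omega
      rw [hx, hsl, htake, PySem.Set.ofList_append_singleton]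
      set F := ((PySem.Set.ofList (n.take k)).filter
        (fun v => decide (1 < pvCnt n v))).map (fun v => (v, pvCnt n v)) with hF
      have hkeysmk : (PySem.Dict.mk F).keys
          = (PySem.Set.ofList (n.take k)).filter (fun v => decide (1 < pvCnt n v)) := by
        show F.map Prod.fst = _
        rw [hF, List.map_map]
        exact map_id_congr _ _ (fun v _ => rfl)
      by_cases hmem : n[k] ∈ n.drop (k+1)
      · have hdup : 1 < pvCnt n n[k] := by
          unfold pvCnt
          have h1 : 0 < List.count n[k] (n.drop (k+1)) := List.count_pos_iff.mpr hmem
          omega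
        have hcont : ((n.drop (k+1)).contains n[k]) = true := by simpa using hmem
        rw [if_pos hcont]
        by_cases hseen : n[k] ∈ n.take k
        · -- overwrite in place: the dict is unchanged
          have hc : (PySem.Dict.mk F).contains n[k] = true := by
            rw [PySem.Dict.contains_eq_decide_mem_keys, hkeysmk]
            simp only [decide_eq_true_eq, List.mem_filter]
            exact ⟨(PySem.Set.mem_ofList _ _).mpr hseen, by simpa using hdup⟩
          apply PySem.Dict.ext
          rw [PySem.Dict.items_insert, hc, if_pos rfl, hit, hit]
          rw [PySem.Set.add_of_mem ((PySem.Set.mem_ofList _ _).mpr hseen)]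
          have : ∀ p ∈ F, (if p.1 == n[k] then (n[k], (PySem.List.count n n[k] : Int)) else p) = p := by
            intro p hp
            rcases List.mem_map.mp hp with ⟨v, hv, rfl⟩
            by_cases hvx : v = n[k]
            · subst hvx; simp [pvCnt, PySem.List.count]
            · simp [hvx]
          rw [map_id_congr F _ this]
        · -- a new key appends
          have hc : (PySem.Dict.mk F).contains n[k] = false := by
            rw [PySem.Dict.contains_eq_decide_mem_keys, hkeysmk]
            simp only [decide_eq_false_iff_not, List.mem_filter]
            intro hcontra
            exact hseen ((PySem.Set.mem_ofList _ _).mp hcontra.1)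
          apply PySem.Dict.ext
          rw [PySem.Dict.items_insert, hc, hit, hit]
          simp only [Bool.false_eq_true, if_false]
          rw [PySem.Set.add_of_not_mem (fun hc' => hseen ((PySem.Set.mem_ofList _ _).mp hc'))]
          rw [List.filter_append, List.map_append]
          congr 1
          have hd : (decide (1 < pvCnt n n[k])) = true := decide_eq_true hdup
          simp only [List.filter_cons, List.filter_nil, hd, if_true]
          rfl
      · have hcont : ((n.drop (k+1)).contains n[k]) = false := by simpa using hmem
        rw [if_neg (by rw [hcont]; simp)]
        by_cases hseen : n[k] ∈ n.take k
        · rw [PySem.Set.add_of_mem ((PySem.Set.mem_ofList _ _).mpr hseen)]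
        · have hone : List.count n[k] n = 1 := by
            have h1 : List.count n[k] (n.take k) = 0 := by
              simpa using List.count_eq_zero.mpr hseen
            have h2 : List.count n[k] (n.drop (k+1)) = 0 := by
              simpa using List.count_eq_zero.mpr hmem
            omega
          rw [PySem.Set.add_of_not_mem (fun hc' => hseen ((PySem.Set.mem_ofList _ _).mp hc'))]
          rw [List.filter_append]
          have : List.filter (fun v => decide (1 < pvCnt n v)) [n[k]] = [] := by
            simp [pvCnt, hone]
          rw [this, List.append_nil]

-- A's dict, at the full length
lemma dictA_items_top (n : List Int) :
    ((PySem.List.pyRange 0 (n.length : Int)).foldl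
      (fun (d : PySem.Dict Int Int) i =>
        if (PySem.List.slice n (some (i + 1)) none).contains (PySem.List.pyGetD n i 0) then
          d.insert (PySem.List.pyGetD n i 0) ((PySem.List.count n (PySem.List.pyGetD n i 0) : Int))
        else d)
      PySem.Dict.empty).items = pvPairs n := by
  rw [dictA_items n n.length le_rfl]
  simp only [List.take_length]
  rfl

-- A's output loop just reads off the first components
lemma loopA_index (bs : List (Int × Int)) :
    (PySem.List.pyRange 0 (bs.length : Int)).foldl
      (fun a j => a ++ [(PySem.List.pyGetD bs j ((0:Int), (0:Int))).1]) []
    = bs.map Prod.fst := by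
  rw [PySem.List.foldl_append_singleton_eq_map, List.nil_append]
  have h1 : List.map (fun j => (PySem.List.pyGetD bs j ((0:Int),(0:Int))).1)
        (PySem.List.pyRange 0 (bs.length : Int))
      = List.map Prod.fst (List.map (fun j => PySem.List.pyGetD bs j ((0:Int),(0:Int)))
        (PySem.List.pyRange 0 (bs.length : Int))) := by
    rw [List.map_map]; rfl
  rw [h1]
  have h2 := PySem.List.map_pyGetD_pyRange_zero bs ((0:Int),(0:Int))
  rw [show PySem.List.len bs = (bs.length : Int) from by simp [PySem.List.len]] at h2
  rw [h2]

-- B's buckets dict, looked up at any count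
lemma bucketsB_getD (n : List Int) (c : Int) :
    ((PySem.Set.ofList n).foldl
      (fun (d : PySem.Dict Int (List Int)) x =>
        if 1 < (List.count x n : Int) then
          d.insert ((List.count x n : Int)) (d.getD ((List.count x n : Int)) [] ++ [x])
        else d)
      PySem.Dict.empty).getD c []
    = (pvDup n).filter (fun v => decide (pvCnt n v = c)) := by
  rw [PySem.List.foldl_ite_eq_foldl_filter (p := fun x => (1:Int) < (List.count x n : Int))
    (f := fun (d : PySem.Dict Int (List Int)) x =>
      d.insert ((List.count x n : Int)) (d.getD ((List.count x n : Int)) [] ++ [x]))]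
  have hfold :
      ((PySem.Set.ofList n).filter (fun x => decide ((1:Int) < (List.count x n : Int)))).foldl
        (fun (d : PySem.Dict Int (List Int)) x =>
          d.insert ((List.count x n : Int)) (d.getD ((List.count x n : Int)) [] ++ [x]))
        PySem.Dict.empty
      = (((PySem.Set.ofList n).filter (fun x => decide ((1:Int) < (List.count x n : Int)))).map
          (fun v => ((List.count v n : Int), v))).foldl
        (fun d p => d.modify p.1 [] (fun l => l ++ [p.2])) PySem.Dict.empty := by
    rw [List.foldl_map]
    rfl
  rw [hfold, PySem.Dict.getD_foldl_modify_append, PySem.Dict.getD_empty, List.nil_append]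
  rw [List.filter_map, List.map_map]
  unfold pvDup pvCnt
  refine (map_id_congr _ _ (fun v _ => rfl)).trans (List.filter_congr ?_)
  intro v _
  show ((List.count v n : Int) == c) = decide ((List.count v n : Int) = c)
  by_cases h : (List.count v n : Int) = c <;> simp [h]

-- A's result in normal form
lemma portA_eq (n : List Int) : get_repetition n = pvBucketed n := by
  simp only [get_repetition]
  rw [dictA_items_top, loopA_index]
  have hmem : ∀ p ∈ pvPairs n, p.2 ∈ pvCs n := by
    intro p hp
    rcases List.mem_map.mp hp with ⟨v, hv, rfl⟩
    rcases List.mem_filter.mp hv with ⟨_, hdup⟩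
    have h2 : 1 < pvCnt n v := by simpa using hdup
    have h3 : pvCnt n v ≤ (n.length : Int) := by
      unfold pvCnt
      exact_mod_cast List.count_le_length
    exact mem_pvCs n (pvCnt n v) (by omega) h3
  rw [sorted_rev_snd_eq_flatMap (pvPairs n) (pvCs n) (pvCs_pairwise n) hmem]
  rw [List.map_flatMap]
  unfold pvBucketed
  apply List.flatMap_congr
  intro c hc
  unfold pvPairs
  rw [List.filter_map, List.map_map]
  exact (map_id_congr _ _ (fun v _ => rfl)).trans (List.filter_congr (fun v _ => rfl))

-- B's result in normal form
lemma portB_eq (n : List Int) : get_repetition_alt n = pvBucketed n := by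
  simp only [get_repetition_alt, PySem.List.dedup,
    PySem.Dict.foldl_insert_getD_add_one_eq_counter, PySem.Dict.getD_counter]
  simp only [bucketsB_getD]
  rw [PySem.List.foldl_append_eq_flatMap, List.nil_append, pyRange_desc]
  have hcast : ((n.length : Int) - 1).toNat = n.length - 1 := by omega
  rw [hcast]
  rfl

-- ===== VERDICT (by name: the statement is the Claim_ definition above) =====
theorem get_repetition_spec : Claim_equal_get_repetition := by
  intro nums _
  unfold Spec_get_repetition
  rw [portA_eq, portB_eq]
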